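-- pv_equiv track=rewrite | github.com/BetterZH/pytorch_caption | vis/stat_server.py | cmp_ignore_case1
-- ===== SOURCE A (Python) =====
-- def cmp_ignore_case1(s1, s2):
--     u1 = s1.split(",")[0].lower()
--     u2 = s2.split(",")[0].lower()
--     len_u1 = len(u1)
--     len_u2 = len(u2)
--     min_len = min(len_u1, len_u2)
--     for i in range(min_len):
--         w1 = u1[i]
--         w2 = u2[i]
--         if w1 < w2:
--             return -1
--         elif w1 > w2:
--             return 1
--     if len_u1 < len_u2:
--         return -1
--     elif len_u1 > len_u2:
--         return 1
--     return 0
-- ===== SOURCE B (Python) =====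
-- def cmp_ignore_case1(s1, s2):
--     u1 = s1.split(",")[0].lower()
--     u2 = s2.split(",")[0].lower()
--     return (u1 > u2) - (u1 < u2)
-- ===== Notes on version B (the rewrite author's own statement) =====
-- stated objective: idiomatic
-- what changed: Replaces the explicit index loop and the trailing length-comparison branches with a single closed-form sign expression (u1 > u2) - (u1 < u2) over Python's built-in lexicographic string comparison.
import Mathlib
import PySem

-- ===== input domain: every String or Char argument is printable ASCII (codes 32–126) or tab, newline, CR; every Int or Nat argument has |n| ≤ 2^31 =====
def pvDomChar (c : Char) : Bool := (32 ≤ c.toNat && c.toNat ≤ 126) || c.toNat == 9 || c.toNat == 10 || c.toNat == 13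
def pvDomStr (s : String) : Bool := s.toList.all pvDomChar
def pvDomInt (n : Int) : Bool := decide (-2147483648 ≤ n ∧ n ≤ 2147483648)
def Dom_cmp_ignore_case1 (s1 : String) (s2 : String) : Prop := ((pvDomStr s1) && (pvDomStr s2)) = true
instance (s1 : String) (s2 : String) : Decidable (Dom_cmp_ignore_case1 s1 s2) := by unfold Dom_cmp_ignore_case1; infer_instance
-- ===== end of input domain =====

-- B replaces A's explicit index loop and trailing length branches with one closed-form
-- sign expression over the built-in lexicographic string comparison (idiomatic, same cost).

-- ===== PORT A =====
-- A's for-loop over range(min_len), as structural recursion on the index i.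
-- u[i] is in range whenever taken (i < min of the lengths), so List.getD is exact here.
def pvALoop (u1 u2 : List Char) (len1 len2 : Nat) (i : Nat) : Int :=
  if _h : i < min len1 len2 then
    let w1 := u1.getD i ' '
    let w2 := u2.getD i ' '
    if w1 < w2 then -1
    else if w1 > w2 then 1
    else pvALoop u1 u2 len1 len2 (i + 1)
  else
    if len1 < len2 then -1
    else if len1 > len2 then 1
    else 0
termination_by min len1 len2 - i

-- s.split(",") always returns a nonempty list, so [0] is its head (headI is exact here).
def cmp_ignore_case1 (s1 : String) (s2 : String) : Int :=
  let u1 := PySem.Chars.lower ((PySem.Chars.splitOn s1.toList [',']).headI)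
  let u2 := PySem.Chars.lower ((PySem.Chars.splitOn s2.toList [',']).headI)
  pvALoop u1 u2 u1.length u2.length 0

-- ===== PORT B =====
-- Python's str </> is lexicographic with the prefix rule: exactly List Char's < order.
def cmp_ignore_case1_alt (s1 : String) (s2 : String) : Int :=
  let u1 := PySem.Chars.lower ((PySem.Chars.splitOn s1.toList [',']).headI)
  let u2 := PySem.Chars.lower ((PySem.Chars.splitOn s2.toList [',']).headI)
  (if u1 > u2 then (1 : Int) else 0) - (if u1 < u2 then (1 : Int) else 0)

-- ===== PRECONDITION & SPEC =====
def Spec_cmp_ignore_case1 (s1 : String) (s2 : String) (out : Int) : Prop := out = cmp_ignore_case1_alt s1 s2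
instance (s1 : String) (s2 : String) (out : Int) : Decidable (Spec_cmp_ignore_case1 s1 s2 out) := by unfold Spec_cmp_ignore_case1; infer_instance

-- ===== CLAIM (what is proved, stated in full; the proofs are below) =====
def Claim_equal_cmp_ignore_case1 : Prop := ∀ (s1 : String) (s2 : String), Dom_cmp_ignore_case1 s1 s2 → Spec_cmp_ignore_case1 s1 s2 (cmp_ignore_case1 s1 s2)

-- ===== LEMMAS AND PROOFS =====

-- the closed-form sign of B, as a function of the two lists
def pvSgn (u1 u2 : List Char) : Int :=
  (if u1 > u2 then (1 : Int) else 0) - (if u1 < u2 then (1 : Int) else 0)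

theorem pvSgn_nil_nil : pvSgn [] [] = 0 := by decide

theorem pvSgn_nil_cons (b : Char) (bs : List Char) : pvSgn [] (b :: bs) = -1 := by
  simp [pvSgn, GT.gt, List.nil_lt_cons]

theorem pvSgn_cons_nil (a : Char) (as : List Char) : pvSgn (a :: as) [] = 1 := by
  simp [pvSgn, GT.gt, List.nil_lt_cons]

theorem pvSgn_cons_cons (a b : Char) (as bs : List Char) :
    pvSgn (a :: as) (b :: bs) =
      (if a < b then -1 else if b < a then 1 else pvSgn as bs) := by
  rcases lt_trichotomy a b with h | h | h
  · simp [pvSgn, GT.gt, List.cons_lt_cons_iff, h, asymm h, h.ne, h.ne']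
  · subst h
    simp [pvSgn, GT.gt]
  · simp [pvSgn, GT.gt, List.cons_lt_cons_iff, h, asymm h, h.ne, h.ne']

-- A's loop from index i computes the sign of the lexicographic comparison of the tails
theorem pvALoop_eq_sgn (u1 u2 : List Char) (i : Nat) (hi : i ≤ min u1.length u2.length) :
    pvALoop u1 u2 u1.length u2.length i = pvSgn (u1.drop i) (u2.drop i) := by
  by_cases h : i < min u1.length u2.length
  · have h1 : i < u1.length := lt_of_lt_of_le h (Nat.min_le_left _ _)
    have h2 : i < u2.length := lt_of_lt_of_le h (Nat.min_le_right _ _)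
    have hd1 : u1.drop i = u1[i] :: u1.drop (i + 1) := List.drop_eq_getElem_cons h1
    have hd2 : u2.drop i = u2[i] :: u2.drop (i + 1) := List.drop_eq_getElem_cons h2
    have ih := pvALoop_eq_sgn u1 u2 (i + 1) (by omega)
    rw [pvALoop]
    simp only [h, hd1, hd2, pvSgn_cons_cons,
      List.getD_eq_getElem u1 ' ' h1, List.getD_eq_getElem u2 ' ' h2, GT.gt]
    split_ifs with h3 h4 <;> simp_all
  · have hieq : i = min u1.length u2.length := le_antisymm hi (le_of_not_gt h)
    rw [pvALoop]
    simp only [h, dif_neg, not_false_iff]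
    rcases Nat.lt_trichotomy u1.length u2.length with hl | hl | hl
    · have hi2 : i < u2.length := by omega
      have hd1 : u1.drop i = [] := List.drop_eq_nil_of_le (by omega)
      have hd2 : u2.drop i = u2[i] :: u2.drop (i + 1) := List.drop_eq_getElem_cons hi2
      rw [hd1, hd2, pvSgn_nil_cons]
      simp [hl]
    · have hd1 : u1.drop i = [] := List.drop_eq_nil_of_le (by omega)
      have hd2 : u2.drop i = [] := List.drop_eq_nil_of_le (by omega)
      rw [hd1, hd2, pvSgn_nil_nil]
      simp [hl, GT.gt]
    · have hi1 : i < u1.length := by omega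
      have hd1 : u1.drop i = u1[i] :: u1.drop (i + 1) := List.drop_eq_getElem_cons hi1
      have hd2 : u2.drop i = [] := List.drop_eq_nil_of_le (by omega)
      rw [hd1, hd2, pvSgn_cons_nil]
      have : ¬ u1.length < u2.length := Nat.not_lt.mpr (le_of_lt hl)
      simp [this, hl, GT.gt]
termination_by min u1.length u2.length - i

-- ===== VERDICT (by name: the statement is the Claim_ definition above) =====
theorem cmp_ignore_case1_spec : Claim_equal_cmp_ignore_case1 := by
  intro s1 s2 _
  unfold Spec_cmp_ignore_case1 cmp_ignore_case1 cmp_ignore_case1_alt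
  rw [pvALoop_eq_sgn _ _ 0 (Nat.zero_le _)]
  simp [pvSgn]
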